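-- pv_equiv track=rewrite | github.com/Alexqq11/fatreder | Core.py | _count_data
-- ===== SOURCE A (Python) =====
-- def _count_data(from_in, to_in, where):
--     step = 1
--     sum = 0
--     i = to_in
--     while(i >= from_in): #for i in range(to_in - 1 , from_in + 1, -1):
--         sum += where[i] * step
--         step *= 2
--         i -= 1
--     return sum
-- ===== SOURCE B (Python) =====
-- def _count_data(from_in, to_in, where):
--     result = 0
--     for i in range(from_in, to_in + 1):
--         result = result * 2 + where[i]
--     return result
-- ===== Notes on version B (the rewrite author's own statement) =====
-- stated objective: idiomatic
-- what changed: Replaces the descending while-loop that maintains a doubling weight `step` with Horner's rule: one ascending for-loop over range(from_in, to_in+1) updating result = result*2 + where[i].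
import Mathlib
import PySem

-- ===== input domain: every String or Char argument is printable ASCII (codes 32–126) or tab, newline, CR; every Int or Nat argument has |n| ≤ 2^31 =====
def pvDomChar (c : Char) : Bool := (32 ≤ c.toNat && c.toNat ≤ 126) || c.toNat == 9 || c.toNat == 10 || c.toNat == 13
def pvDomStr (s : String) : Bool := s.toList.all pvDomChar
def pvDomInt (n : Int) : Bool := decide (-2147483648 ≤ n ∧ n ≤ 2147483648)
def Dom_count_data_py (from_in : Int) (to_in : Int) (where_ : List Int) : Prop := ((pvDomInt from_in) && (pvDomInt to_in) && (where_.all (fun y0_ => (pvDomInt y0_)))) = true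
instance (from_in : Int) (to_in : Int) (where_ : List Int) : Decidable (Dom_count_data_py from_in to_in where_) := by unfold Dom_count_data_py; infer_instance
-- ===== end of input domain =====

-- B replaces A's descending while-loop with a maintained doubling weight by Horner's rule
-- over an ascending range (idiomatic; same cost).

-- ===== PORT A =====
-- A's while-loop: fuel = number of iterations (to_in - from_in + 1); state (i, step, sum).
def pvCountLoop (where_ : List Int) : Nat → Int → Int → Int → Int
  | 0, _, _, s => s
  | n+1, i, step, s =>
      pvCountLoop where_ n (i - 1) (step * 2) (s + PySem.List.pyGetD where_ i 0 * step)

def count_data_py (from_in : Int) (to_in : Int) (where_ : List Int) : Int :=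
  pvCountLoop where_ (to_in - from_in + 1).toNat to_in 1 0

-- ===== PORT B =====
def count_data_py_alt (from_in : Int) (to_in : Int) (where_ : List Int) : Int :=
  (PySem.List.pyRange from_in (to_in + 1) 1).foldl
    (fun acc i => acc * 2 + PySem.List.pyGetD where_ i 0) 0

-- ===== PRECONDITION & SPEC =====
-- Pre_: every index A reads is a valid Python index (A raises IndexError otherwise).
def Pre_count_data_py (from_in : Int) (to_in : Int) (where_ : List Int) : Prop :=
  to_in < from_in ∨ (-(where_.length : Int) ≤ from_in ∧ to_in < (where_.length : Int))
instance (from_in : Int) (to_in : Int) (where_ : List Int) : Decidable (Pre_count_data_py from_in to_in where_) := by unfold Pre_count_data_py; infer_instance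

def pvWitness_count_data_py : Int × Int × List Int := (0, 1, [3, 5])

def Spec_count_data_py (from_in : Int) (to_in : Int) (where_ : List Int) (out : Int) : Prop := out = count_data_py_alt from_in to_in where_
instance (from_in : Int) (to_in : Int) (where_ : List Int) (out : Int) : Decidable (Spec_count_data_py from_in to_in where_ out) := by unfold Spec_count_data_py; infer_instance

-- ===== CLAIM (what is proved, stated in full; the proofs are below) =====
def Claim_equal_count_data_py : Prop := ∀ (from_in : Int) (to_in : Int) (where_ : List Int), Dom_count_data_py from_in to_in where_ → Pre_count_data_py from_in to_in where_ → Spec_count_data_py from_in to_in where_ (count_data_py from_in to_in where_)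

-- ===== LEMMAS AND PROOFS =====

-- Loop invariant: A's descending loop with n iterations left, current index i,
-- equals sum + step · (Horner value of where_ over [i-n+1 .. i]).
theorem pvCountLoop_eq (where_ : List Int) :
    ∀ (n : Nat) (i step s : Int),
      pvCountLoop where_ n i step s =
        s + step * (PySem.List.pyRange (i - n + 1) (i + 1) 1).foldl
          (fun acc j => acc * 2 + PySem.List.pyGetD where_ j 0) 0 := by
  intro n
  induction n with
  | zero =>
    intro i step s
    simp [pvCountLoop, PySem.List.pyRange_one_eq_nil (le_refl (i+1))]
  | succ n ih =>
    intro i step s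
    have hsplit : PySem.List.pyRange (i - (n+1:Nat) + 1) (i + 1) 1 =
        PySem.List.pyRange (i - (n+1:Nat) + 1) i 1 ++ [i] := by
      have := PySem.List.pyRange_one_succ_right (a := i - (n+1:Nat) + 1) (b := i)
        (by push_cast; omega)
      exact this
    rw [pvCountLoop, ih, hsplit, List.foldl_append]
    have harg : i - 1 - (n:Int) + 1 = i - ((n:Nat)+1:Nat) + 1 := by push_cast; omega
    rw [harg]
    simp only [List.foldl_cons, List.foldl_nil]
    ring

theorem count_data_py_spec : Claim_equal_count_data_py := by
  intro from_in to_in where_ _ _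
  unfold Spec_count_data_py count_data_py count_data_py_alt
  rw [pvCountLoop_eq]
  by_cases h : from_in ≤ to_in + 1
  · have ht : ((to_in - from_in + 1).toNat : Int) = to_in - from_in + 1 := by omega
    rw [show to_in - ((to_in - from_in + 1).toNat : Int) + 1 = from_in by omega]
    ring
  · rw [PySem.List.pyRange_one_eq_nil (by omega : to_in + 1 ≤ from_in),
        PySem.List.pyRange_one_eq_nil (by omega : to_in + 1 ≤ to_in - ((to_in - from_in + 1).toNat : Int) + 1)]
    simp
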